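-- pv_equiv track=rewrite | github.com/lonely7yk/LeetCode_py | LeetCode1000/LeetCode1585CheckIfStringIsTransformableWithSubstringSortOperations.py | isTransformable
-- ===== SOURCE A (Python) =====
-- import collections
--
-- def isTransformable(s: str, t: str) -> bool:
--     # s 和 t 长度不同直接 return False
--     if len(s) != len(t): return False
--
--     n = len(s)
--     # 记录 t 中的各个数字的个数
--     count = [0 for i in range(10)]
--     preMap = collections.defaultdict(collections.deque)
--
--     for i in range(n):
--         num = int(t[i])
--         count[num] += 1
--         # 对于每一个数依次添加当时的 count 快照
--         preMap[num].append(list(count))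
--
--     # 记录 s 中的各个数字的个数
--     count2 = [0 for i in range(10)]
--     for i in range(n):
--         # s 中当前数，要保证 num 前面比 num 大的数的个数都不小于变化后
--         num = int(s[i])
--         count2[num] += 1
--
--         if preMap[num]:
--             curCount = preMap[num].popleft()
--             for j in range(num + 1, 10):
--                 if count2[j] < curCount[j]: return False
--
--     # 如果 s 和 t 的 count 不一致返回 False
--     for i in range(10):
--         if count[i] != count2[i]: return False
--
--     return True
-- ===== SOURCE B (Python) =====
-- def isTransformable(s: str, t: str) -> bool:
--     if len(s) != len(t):
--         return False
--     ds = [int(ch) for ch in s]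
--     dt = [int(ch) for ch in t]
--     pos_s = [[i for i, d in enumerate(ds) if d == c] for c in range(10)]
--     pos_t = [[i for i, d in enumerate(dt) if d == c] for c in range(10)]
--     if any(len(pos_s[c]) != len(pos_t[c]) for c in range(10)):
--         return False
--
--     def prefix(dd):
--         table = []
--         for c in range(10):
--             acc = [0]
--             for d in dd:
--                 acc.append(acc[-1] + (1 if d == c else 0))
--             table.append(acc)
--         return table
--
--     Ps, Pt = prefix(ds), prefix(dt)
--     return all(Ps[j][i + 1] >= Pt[j][m + 1]
--                for c in range(10)
--                for i, m in zip(pos_s[c], pos_t[c])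
--                for j in range(c + 1, 10))
-- ===== Notes on version B (the rewrite author's own statement) =====
-- stated objective: alternative
-- what changed: Replaces A's single-pass scan with incremental count arrays and a defaultdict of deque snapshots by a digit-major formulation: per-digit occurrence-position lists plus per-digit prefix-count tables, then one comprehension checking every matched occurrence pair against the larger-digit prefix counts.
-- outside the precondition, e.g. on isTransformable('1x', '21'): A returns False, B raises ValueError
import Mathlib
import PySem

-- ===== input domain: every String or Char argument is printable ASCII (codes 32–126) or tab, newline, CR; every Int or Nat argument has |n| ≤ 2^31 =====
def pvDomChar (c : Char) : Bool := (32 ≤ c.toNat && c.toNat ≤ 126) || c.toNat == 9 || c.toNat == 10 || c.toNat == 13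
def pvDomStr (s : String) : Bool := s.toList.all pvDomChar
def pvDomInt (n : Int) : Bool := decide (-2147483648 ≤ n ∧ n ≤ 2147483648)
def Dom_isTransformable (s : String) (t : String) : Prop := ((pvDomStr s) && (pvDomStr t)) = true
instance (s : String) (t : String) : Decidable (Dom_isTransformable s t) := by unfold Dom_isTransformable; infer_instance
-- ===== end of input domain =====

-- B replaces A's single left-to-right scan (incremental count arrays + a defaultdict of deque
-- snapshots) by a digit-major formulation: per-digit occurrence-position lists and per-digit
-- prefix-count tables, checked pairwise (objective: alternative, same asymptotic cost).

-- ===== PORT A =====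

-- int(ch) for a single character; Pre_ excludes the inputs where Python's int() raises
def pyDigit (c : Char) : Int := (PySem.Int.ofStr? (String.ofList [c])).getD 0

-- body of A's first loop (count snapshot + defaultdict-of-deque append)
def stepT (st : List Int × PySem.Dict Int (List (List Int))) (ch : Char) :
    List Int × PySem.Dict Int (List (List Int)) :=
  let num := pyDigit ch
  let count := st.1.set num.toNat (PySem.List.pyGetD st.1 num 0 + 1)
  (count, st.2.modify num [] (fun q => q ++ [count]))

-- A's second loop, with its early `return False` as `none`
def loop2A : List Char → List Int → PySem.Dict Int (List (List Int)) → Option (List Int)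
  | [], count2, _ => some count2
  | ch :: rest, count2, pm =>
    let num := pyDigit ch
    let count2' := count2.set num.toNat (PySem.List.pyGetD count2 num 0 + 1)
    match pm.getD num [] with
    | [] => loop2A rest count2' pm
    | cur :: q =>
      if (PySem.List.pyRange (num+1) 10 1).any
          (fun j => PySem.List.pyGetD count2' j 0 < PySem.List.pyGetD cur j 0)
      then none
      else loop2A rest count2' (pm.insert num q)

def isTransformable (s : String) (t : String) : Bool :=
  if s.toList.length ≠ t.toList.length then false
  else
    let st1 := t.toList.foldl stepT (List.replicate 10 (0:Int), PySem.Dict.empty)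
    match loop2A s.toList (List.replicate 10 (0:Int)) st1.2 with
    | none => false
    | some count2 =>
        (List.range 10).all (fun i =>
          PySem.List.pyGetD st1.1 (i:Int) 0 == PySem.List.pyGetD count2 (i:Int) 0)

-- ===== PORT B =====

-- [i for i, d in enumerate(dd) if d == c]
def posList (dd : List Int) (c : Int) : List Int :=
  ((PySem.List.enumerate dd 0).filter (fun p => p.2 == c)).map (·.1)

-- one row of B's prefix-count table: acc[-1] + (1 if d == c else 0) appended per element
def prefTab (dd : List Int) (c : Int) : List Int :=
  dd.foldl (fun acc d => acc ++ [PySem.List.pyGetD acc (-1) 0 + (if d == c then 1 else 0)]) [0]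

def isTransformable_alt (s : String) (t : String) : Bool :=
  if s.toList.length ≠ t.toList.length then false
  else
    let ds := s.toList.map pyDigit
    let dt := t.toList.map pyDigit
    let posS := (List.range 10).map (fun c : Nat => posList ds (c:Int))
    let posT := (List.range 10).map (fun c : Nat => posList dt (c:Int))
    if (List.range 10).any (fun c => (posS.getD c []).length ≠ (posT.getD c []).length) then false
    else
      let Ps := (List.range 10).map (fun c : Nat => prefTab ds (c:Int))
      let Pt := (List.range 10).map (fun c : Nat => prefTab dt (c:Int))
      (List.range 10).all (fun c =>
        ((posS.getD c []).zip (posT.getD c [])).all (fun im =>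
          (PySem.List.pyRange ((c:Int)+1) 10 1).all (fun j =>
            PySem.List.pyGetD (Pt.getD j.toNat []) (im.2+1) 0 ≤
            PySem.List.pyGetD (Ps.getD j.toNat []) (im.1+1) 0)))

-- ===== PRECONDITION & SPEC =====
-- Pre_ excludes equal-length inputs containing a non-digit character: on those int() raises
-- ValueError (B always raises there; A also raises except when an early `return False` fires
-- before A reaches the offending character of s, e.g. ("1x","21"), where B still raises).
def Pre_isTransformable (s : String) (t : String) : Prop :=
  s.toList.length ≠ t.toList.length ∨
    (s.toList.all Char.isDigit = true ∧ t.toList.all Char.isDigit = true)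
instance (s : String) (t : String) : Decidable (Pre_isTransformable s t) := by
  unfold Pre_isTransformable; infer_instance

def pvWitness_isTransformable : String × String := ("12", "21")

def Spec_isTransformable (s : String) (t : String) (out : Bool) : Prop := out = isTransformable_alt s t
instance (s : String) (t : String) (out : Bool) : Decidable (Spec_isTransformable s t out) := by unfold Spec_isTransformable; infer_instance

-- ===== CLAIM (what is proved, stated in full; the proofs are below) =====
def Claim_equal_isTransformable : Prop := ∀ (s : String) (t : String), Dom_isTransformable s t → Pre_isTransformable s t → Spec_isTransformable s t (isTransformable s t)

-- ===== LEMMAS AND PROOFS =====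

-- digits of a character list
def mapD (cs : List Char) : List Int := cs.map pyDigit

-- number of occurrences of c, as an Int
def cnt (l : List Int) (c : Int) : Int := (l.count c : Int)

-- the 10-entry count vector A maintains incrementally
def cvec (l : List Int) : List Int := (List.range 10).map (fun j : Nat => cnt l (j : Int))

-- positions of c in l (naturals, in order)
def occN : List Int → Int → List Nat
  | [], _ => []
  | d :: l, c => (if d = c then [0] else []) ++ (occN l c).map (· + 1)

-- A's snapshot deque for digit c after the first loop
def snapList (v : List Int) (c : Int) : List (List Int) :=
  (occN v c).map (fun m => cvec (v.take (m+1)))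

-- the per-event check both programs perform: digit c matched at position i of u / m of v
def okPairB (u v : List Int) (c : Int) (i m : Nat) : Bool :=
  (PySem.List.pyRange (c+1) 10 1).all
    (fun j => decide (cnt (v.take (m+1)) j ≤ cnt (u.take (i+1)) j))

-- all events still pending after consuming prefix-digits p are ok
def restOkB (u v p : List Int) : Bool :=
  (List.range 10).all (fun c =>
    (((occN u (c:Int)).zip (occN v (c:Int))).drop (p.count (c:Int))).all
      (fun pr => okPairB u v (c:Int) pr.1 pr.2))

lemma pyDigit_bounds (c : Char) (h : c.isDigit = true) : 0 ≤ pyDigit c ∧ pyDigit c < 10 := by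
  have h1 : 48 ≤ c.toNat ∧ c.toNat ≤ 57 := by
    simp [Char.isDigit] at h; exact ⟨h.1, h.2⟩
  have hc : c = Char.ofNat c.toNat := by simp [Char.ofNat_toNat]
  obtain ⟨a, b⟩ := h1
  interval_cases h2 : c.toNat <;> rw [hc] <;> decide

lemma cnt_snoc (p : List Int) (d c : Int) :
    cnt (p ++ [d]) c = cnt p c + (if d = c then 1 else 0) := by
  by_cases h : d = c
  · simp [cnt, List.count_append, h]
  · simp [cnt, List.count_append, h]

lemma cvec_length (l : List Int) : (cvec l).length = 10 := by simp [cvec]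

lemma cvec_get (w : List Int) (j : Int) (h0 : 0 ≤ j) (h1 : j < 10) :
    PySem.List.pyGetD (cvec w) j 0 = cnt w j := by
  rw [PySem.List.pyGetD_of_nonneg _ _ h0]
  rw [List.getD_eq_getElem _ _ (by rw [cvec_length]; omega)]
  simp only [cvec, List.getElem_map, List.getElem_range]
  congr 1; omega

lemma cvec_snoc (p : List Int) (d : Int) (h0 : 0 ≤ d) (h1 : d < 10) :
    cvec (p ++ [d]) = (cvec p).set d.toNat (PySem.List.pyGetD (cvec p) d 0 + 1) := by
  apply List.ext_getElem
  · simp [cvec_length]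
  · intro k hk hk'
    rw [cvec_length] at hk
    rw [List.getElem_set]
    simp only [cvec_get p d h0 h1]
    have hL : (cvec (p ++ [d]))[k]'(by rw [cvec_length]; omega) = cnt (p ++ [d]) (k:Int) := by
      simp only [cvec, List.getElem_map, List.getElem_range]
    have hR : (cvec p)[k]'(by rw [cvec_length]; omega) = cnt p (k:Int) := by
      simp only [cvec, List.getElem_map, List.getElem_range]
    rw [hL, hR, cnt_snoc]
    by_cases hd : d = (k:Int)
    · simp [hd]
    · simp [hd, show ¬ d.toNat = k by omega]

lemma cvec_nil : cvec [] = List.replicate 10 (0:Int) := by decide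

lemma occN_append (p r : List Int) (c : Int) :
    occN (p ++ r) c = occN p c ++ (occN r c).map (· + p.length) := by
  induction p with
  | nil => simp [occN]
  | cons d p ih => simp [occN, ih, List.map_map, List.map_append]

lemma occN_length (l : List Int) (c : Int) : (occN l c).length = l.count c := by
  induction l with
  | nil => simp [occN]
  | cons d l ih =>
      simp [occN, List.count_cons, ih]
      split <;> simp <;> omega

lemma occN_mem_lt (l : List Int) (c : Int) (n : Nat) (h : n ∈ occN l c) : n < l.length := by
  induction l generalizing n with
  | nil => simp [occN] at h
  | cons d l ih =>
      simp [occN] at h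
      rcases h with h | ⟨m, hm, rfl⟩
      · simp [h.2]
      · have := ih m hm; simp; omega

lemma occN_snoc (p : List Int) (d c : Int) :
    occN (p ++ [d]) c = occN p c ++ (if d = c then [p.length] else []) := by
  rw [occN_append]
  by_cases h : d = c <;> simp [occN, h]

lemma snapList_snoc (w : List Int) (d c : Int) :
    snapList (w ++ [d]) c = snapList w c ++ (if d = c then [cvec (w ++ [d])] else []) := by
  unfold snapList
  rw [occN_snoc]
  rw [List.map_append]
  congr 1
  · apply List.map_congr_left
    intro m hm
    have := occN_mem_lt w c m hm
    rw [List.take_append_of_le_length (by omega)]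
  · have ht : (w ++ [d]).take (w.length + 1) = w ++ [d] := List.take_of_length_le (by simp)
    by_cases h : d = c
    · subst h; simp [ht]
    · simp [h]

lemma pyGetD_last (l : List Int) (x : Int) : PySem.List.pyGetD (l ++ [x]) (-1) 0 = x := by
  simp [PySem.List.pyGetD, PySem.List.pyGet?, PySem.List.pyIdx?]

lemma posList_aux (l : List Int) (c : Int) : ∀ s : Int,
    ((PySem.List.enumerate l s).filter (fun p => p.2 == c)).map (·.1)
      = (occN l c).map (fun n : Nat => s + (n : Int)) := by
  induction l with
  | nil => intro s; simp [occN, PySem.List.enumerate]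
  | cons d l ih =>
      intro s
      rw [PySem.List.enumerate_cons, List.filter_cons]
      by_cases h : d = c
      · subst h
        simp only [beq_self_eq_true, if_pos, List.map_cons, occN,
          List.singleton_append]
        rw [ih (s+1)]
        simp only [List.map_map]
        congr 1
        · simp
        · apply List.map_congr_left
          intro n _
          simp
          ring
      · have hb : (d == c) = false := by simp [h]
        simp only [hb, Bool.false_eq_true, if_false, occN, if_neg h, List.nil_append]
        rw [ih (s+1), List.map_map]
        apply List.map_congr_left
        intro n _
        simp
        ring

lemma posList_eq (dd : List Int) (c : Int) :
    posList dd c = (occN dd c).map (fun n : Nat => (n : Int)) := by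
  rw [posList, posList_aux dd c 0]; simp

lemma prefTab_eq (w : List Int) (c : Int) :
    prefTab w c = (List.range (w.length + 1)).map (fun i => cnt (w.take i) c) := by
  unfold prefTab
  induction w using List.reverseRecOn with
  | nil => simp [cnt]
  | append_singleton w d ih =>
      rw [List.foldl_append, ih]
      simp only [List.foldl_cons, List.foldl_nil]
      have hL : PySem.List.pyGetD ((List.range (w.length + 1)).map (fun i => cnt (w.take i) c)) (-1) 0
          = cnt w c := by
        rw [List.range_succ, List.map_append]
        simp only [List.map_cons, List.map_nil]
        rw [pyGetD_last]
        simp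
      rw [hL]
      have hlen : (w ++ [d]).length + 1 = (w.length + 1) + 1 := by simp
      conv_rhs => rw [hlen, List.range_succ, List.map_append]
      congr 1
      · apply List.map_congr_left
        intro i hi
        simp at hi
        rw [List.take_append_of_le_length (by omega)]
      · simp only [List.map_cons, List.map_nil]
        rw [List.take_of_length_le (by simp), cnt_snoc]
        by_cases h : d = c <;> simp [h]


lemma mapD_append (a b : List Char) : mapD (a ++ b) = mapD a ++ mapD b := by simp [mapD]
lemma mapD_singleton (c : Char) : mapD [c] = [pyDigit c] := rfl

-- first loop of A
lemma foldT_spec (tl : List Char) (hb : ∀ ch ∈ tl, ch.isDigit = true) :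
    (tl.foldl stepT (List.replicate 10 (0:Int), PySem.Dict.empty)).1 = cvec (mapD tl) ∧
    ∀ c : Int, (tl.foldl stepT (List.replicate 10 (0:Int), PySem.Dict.empty)).2.getD c []
      = snapList (mapD tl) c := by
  induction tl using List.reverseRecOn with
  | nil =>
      constructor
      · simp [mapD, cvec_nil]
      · intro c; simp [mapD, snapList, occN, PySem.Dict.getD_empty]
  | append_singleton tl ch ih =>
      have hb' : ∀ c ∈ tl, c.isDigit = true := fun c hc => hb c (by simp [hc])
      have hch : ch.isDigit = true := hb ch (by simp)
      obtain ⟨hd0, hd1⟩ := pyDigit_bounds ch hch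
      obtain ⟨ih1, ih2⟩ := ih hb'
      rw [List.foldl_append]
      simp only [List.foldl_cons, List.foldl_nil]
      rw [mapD_append, mapD_singleton]
      constructor
      · simp only [stepT, ih1]
        rw [cvec_snoc _ _ hd0 hd1]
      · intro c
        simp only [stepT, ih1]
        rw [PySem.Dict.getD_modify]
        rw [snapList_snoc]
        by_cases h : c = pyDigit ch
        · rw [if_pos h, ih2, h]
          simp [cvec_snoc _ _ hd0 hd1]
        · rw [if_neg h, ih2]
          have : ¬ pyDigit ch = c := fun hh => h hh.symm
          simp [this]

-- second loop of A, count evolution only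
lemma loop2A_some (r : List Char) : ∀ (q : List Char) pm w,
    (∀ ch ∈ r, ch.isDigit = true) →
    loop2A r (cvec (mapD q)) pm = some w → w = cvec (mapD q ++ mapD r) := by
  induction r with
  | nil => intro q pm w _ h; simp [loop2A] at h; simp [mapD, h.symm]
  | cons ch rest ih =>
      intro q pm w hb h
      have hch : ch.isDigit = true := hb ch (by simp)
      obtain ⟨hd0, hd1⟩ := pyDigit_bounds ch hch
      have hrest : ∀ c ∈ rest, c.isDigit = true := fun c hc => hb c (by simp [hc])
      rw [loop2A] at h
      rw [show (cvec (mapD q)).set (pyDigit ch).toNat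
            (PySem.List.pyGetD (cvec (mapD q)) (pyDigit ch) 0 + 1)
          = cvec (mapD (q ++ [ch])) by rw [mapD_append, mapD_singleton, cvec_snoc _ _ hd0 hd1]] at h
      have goal_eq : mapD q ++ mapD (ch :: rest) = mapD (q ++ [ch]) ++ mapD rest := by
        simp [mapD]
      rw [goal_eq]
      cases hpm : pm.getD (pyDigit ch) [] with
      | nil =>
          rw [hpm] at h
          dsimp only at h
          exact ih (q ++ [ch]) pm w hrest h
      | cons cur qq =>
          rw [hpm] at h
          dsimp only at h
          by_cases hf : ((PySem.List.pyRange (pyDigit ch + 1) 10 1).any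
              (fun j => PySem.List.pyGetD (cvec (mapD (q ++ [ch]))) j 0 < PySem.List.pyGetD cur j 0)) = true
          · rw [if_pos hf] at h; cases h
          · rw [if_neg hf] at h
            exact ih (q ++ [ch]) _ w hrest h

lemma count_mapD_snoc_self (q : List Char) (ch : Char) :
    (mapD (q ++ [ch])).count (pyDigit ch) = (mapD q).count (pyDigit ch) + 1 := by
  simp [mapD, List.count_append]

lemma count_mapD_snoc_ne (q : List Char) (ch : Char) (c : Int) (h : c ≠ pyDigit ch) :
    (mapD (q ++ [ch])).count c = (mapD q).count c := by
  have : (pyDigit ch == c) = false := by simp [Ne.symm h]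
  simp [mapD, List.count_append, List.count_singleton, this]

lemma loop2A_inv (v : List Int) (r : List Char) :
    ∀ (q : List Char) pm,
    (∀ ch ∈ q ++ r, ch.isDigit = true) →
    (∀ c : Int, (mapD (q ++ r)).count c = v.count c) →
    (∀ c : Int, pm.getD c [] = (snapList v c).drop ((mapD q).count c)) →
    loop2A r (cvec (mapD q)) pm =
      if restOkB (mapD (q ++ r)) v (mapD q) then some (cvec (mapD (q ++ r))) else none := by
  induction r with
  | nil =>
      intro q pm hb hcnt hpm
      simp only [List.append_nil] at hcnt ⊢
      have hrest : restOkB (mapD q) v (mapD q) = true := by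
        apply List.all_eq_true.mpr
        intro c _
        have hceq := hcnt (c:Int)
        have hlen : ((occN (mapD q) (c:Int)).zip (occN v (c:Int))).length
            ≤ (mapD q).count (c:Int) := by
          rw [List.length_zip, occN_length, occN_length]; omega
        rw [List.drop_eq_nil_of_le hlen]
        simp
      rw [hrest]
      simp [loop2A]
  | cons ch rest ih =>
      intro q pm hb hcnt hpm
      have hch : ch.isDigit = true := hb ch (by simp)
      obtain ⟨hd0, hd1⟩ := pyDigit_bounds ch hch
      have hbq : ∀ c ∈ (q ++ [ch]) ++ rest, c.isDigit = true := by
        intro c hc; apply hb; simpa [List.append_assoc] using hc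
      have hu : mapD (q ++ ch :: rest) = mapD q ++ pyDigit ch :: mapD rest := by
        simp [mapD]
      have hqsnoc : mapD (q ++ [ch]) = mapD q ++ [pyDigit ch] := by simp [mapD]
      have hk_lt_u : (mapD q).count (pyDigit ch) < (mapD (q ++ ch :: rest)).count (pyDigit ch) := by
        rw [hu]; simp [List.count_append, List.count_cons_self]
      have hk_lt_v : (mapD q).count (pyDigit ch) < v.count (pyDigit ch) := by
        rw [← hcnt (pyDigit ch)]; exact hk_lt_u
      have hkOu : (mapD q).count (pyDigit ch)
          < (occN (mapD (q ++ ch :: rest)) (pyDigit ch)).length := by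
        rw [occN_length]; exact hk_lt_u
      have hkOv : (mapD q).count (pyDigit ch) < (occN v (pyDigit ch)).length := by
        rw [occN_length]; exact hk_lt_v
      -- matched positions
      have hi : (occN (mapD (q ++ ch :: rest)) (pyDigit ch))[(mapD q).count (pyDigit ch)]?
          = some (mapD q).length := by
        rw [hu, occN_append]
        rw [List.getElem?_append_right (by rw [occN_length])]
        rw [occN_length, Nat.sub_self]
        simp [occN]
      have hiElem : (occN (mapD (q ++ ch :: rest)) (pyDigit ch))[(mapD q).count (pyDigit ch)]'hkOu
          = (mapD q).length := by
        have h1 := List.getElem?_eq_getElem hkOu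
        rw [hi] at h1; exact (Option.some.inj h1).symm
      have hmElem : (occN v (pyDigit ch))[(mapD q).count (pyDigit ch)]'hkOv
          = (occN v (pyDigit ch)).getD ((mapD q).count (pyDigit ch)) 0 := by
        rw [List.getD_eq_getElem _ _ hkOv]
      have hzlen : (mapD q).count (pyDigit ch)
          < ((occN (mapD (q ++ ch :: rest)) (pyDigit ch)).zip (occN v (pyDigit ch))).length := by
        rw [List.length_zip]; omega
      have hsnaplen : (mapD q).count (pyDigit ch) < (snapList v (pyDigit ch)).length := by
        simp only [snapList, List.length_map]; exact hkOv
      have hdp : pm.getD (pyDigit ch) [] =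
          cvec (v.take ((occN v (pyDigit ch)).getD ((mapD q).count (pyDigit ch)) 0 + 1))
            :: (snapList v (pyDigit ch)).drop ((mapD q).count (pyDigit ch) + 1) := by
        rw [hpm, List.drop_eq_getElem_cons hsnaplen]
        congr 1
        simp only [snapList, List.getElem_map]
        rw [List.getD_eq_getElem _ _ hkOv]
      have htake : (mapD (q ++ ch :: rest)).take ((mapD q).length + 1)
          = mapD q ++ [pyDigit ch] := by
        rw [hu, List.take_append]; simp
      -- the step
      rw [loop2A]
      rw [show (cvec (mapD q)).set (pyDigit ch).toNat
            (PySem.List.pyGetD (cvec (mapD q)) (pyDigit ch) 0 + 1)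
          = cvec (mapD q ++ [pyDigit ch]) from (cvec_snoc _ _ hd0 hd1).symm]
      rw [hdp]
      dsimp only
      -- A's inline check equals the negation of okPairB at this event
      have hX : ((PySem.List.pyRange (pyDigit ch + 1) 10 1).any (fun j =>
          decide (PySem.List.pyGetD (cvec (mapD q ++ [pyDigit ch])) j 0 <
          PySem.List.pyGetD (cvec (v.take ((occN v (pyDigit ch)).getD ((mapD q).count (pyDigit ch)) 0 + 1))) j 0)))
          = !(okPairB (mapD (q ++ ch :: rest)) v (pyDigit ch) (mapD q).length
              ((occN v (pyDigit ch)).getD ((mapD q).count (pyDigit ch)) 0)) := by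
        unfold okPairB
        by_cases hok : (PySem.List.pyRange (pyDigit ch + 1) 10 1).all (fun j =>
            decide (cnt (v.take ((occN v (pyDigit ch)).getD ((mapD q).count (pyDigit ch)) 0 + 1)) j
              ≤ cnt ((mapD (q ++ ch :: rest)).take ((mapD q).length + 1)) j)) = true
        · rw [hok]
          simp only [Bool.not_true]
          apply List.any_eq_false.mpr
          intro j hj
          obtain ⟨hj1, hj2⟩ := PySem.List.mem_pyRange_one.mp hj
          have := List.all_eq_true.mp hok j hj
          rw [cvec_get _ _ (by omega) (by omega), cvec_get _ _ (by omega) (by omega)]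
          rw [htake] at this
          simp at this ⊢
          omega
        · rw [Bool.eq_false_iff.mpr hok]
          simp only [Bool.not_false]
          apply List.any_eq_true.mpr
          obtain ⟨j, hj, hjf⟩ := List.all_eq_false.mp (Bool.eq_false_iff.mpr hok)
          obtain ⟨hj1, hj2⟩ := PySem.List.mem_pyRange_one.mp hj
          refine ⟨j, hj, ?_⟩
          rw [cvec_get _ _ (by omega) (by omega), cvec_get _ _ (by omega) (by omega)]
          rw [htake] at hjf
          simp at hjf ⊢
          omega
      rw [hX]
      by_cases hok : okPairB (mapD (q ++ ch :: rest)) v (pyDigit ch) (mapD q).length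
          ((occN v (pyDigit ch)).getD ((mapD q).count (pyDigit ch)) 0) = true
      · -- event passes: recurse
        rw [hok]
        simp only [Bool.not_true, Bool.false_eq_true, if_false]
        have hcnt' : ∀ c : Int, (mapD ((q ++ [ch]) ++ rest)).count c = v.count c := by
          intro c; rw [show (q ++ [ch]) ++ rest = q ++ ch :: rest by simp]; exact hcnt c
        have hpm' : ∀ c : Int,
            (pm.insert (pyDigit ch)
              ((snapList v (pyDigit ch)).drop ((mapD q).count (pyDigit ch) + 1))).getD c []
            = (snapList v c).drop ((mapD (q ++ [ch])).count c) := by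
          intro c
          rw [PySem.Dict.getD_insert]
          by_cases hcd : c = pyDigit ch
          · rw [if_pos hcd, hcd, count_mapD_snoc_self]
          · rw [if_neg hcd, hpm c, count_mapD_snoc_ne _ _ _ hcd]
        have hres := ih (q ++ [ch])
          (pm.insert (pyDigit ch)
            ((snapList v (pyDigit ch)).drop ((mapD q).count (pyDigit ch) + 1)))
          hbq hcnt' hpm'
        rw [hqsnoc] at hres
        have hassoc : (q ++ [ch]) ++ rest = q ++ ch :: rest := by simp
        rw [hassoc] at hres
        rw [hres]
        -- pending events unchanged by consuming a passing event
        have hR : restOkB (mapD (q ++ ch :: rest)) v (mapD q ++ [pyDigit ch])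
            = restOkB (mapD (q ++ ch :: rest)) v (mapD q) := by
          unfold restOkB
          apply List.all_congr rfl
          intro c
          by_cases hcd : (c:Int) = pyDigit ch
          · rw [hcd]
            rw [show (mapD q ++ [pyDigit ch]).count (pyDigit ch)
                = (mapD q).count (pyDigit ch) + 1 by simp [List.count_append]]
            rw [List.drop_eq_getElem_cons hzlen, List.getElem_zip]
            simp only [List.all_cons]

            rw [hiElem, hmElem, hok]
            simp
          · rw [show (mapD q ++ [pyDigit ch]).count (c:Int) = (mapD q).count (c:Int) by
              rw [List.count_append]
              have : List.count (c:Int) [pyDigit ch] = 0 :=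
                List.count_eq_zero.mpr (by simp [hcd])
              omega]
        rw [hR]
      · -- event fails: A returns False here and some pending event is bad
        rw [Bool.eq_false_iff.mpr hok]
        simp only [Bool.not_false, if_true]
        have hro : restOkB (mapD (q ++ ch :: rest)) v (mapD q) = false := by
          apply List.all_eq_false.mpr
          refine ⟨(pyDigit ch).toNat, by simp; omega, ?_⟩
          have hcast : (((pyDigit ch).toNat : Nat) : Int) = pyDigit ch := by omega
          rw [hcast]
          rw [List.drop_eq_getElem_cons hzlen, List.getElem_zip]
          simp only [List.all_cons]

          have hokf : okPairB (mapD (q ++ ch :: rest)) v (pyDigit ch) (mapD q).length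
              ((occN v (pyDigit ch)).getD ((mapD q).count (pyDigit ch)) 0) = false :=
            Bool.eq_false_iff.mpr hok
          rw [hiElem, hmElem, hokf]
          simp
        rw [hro]
        simp

-- all-congruence on members (Bool-valued)
lemma all_congr_mem {α : Type} (l : List α) (p q : α → Bool)
    (h : ∀ a ∈ l, p a = q a) : l.all p = l.all q := by
  induction l with
  | nil => rfl
  | cons x xs ih =>
      simp only [List.all_cons, h x (by simp)]
      rw [ih (fun a ha => h a (by simp [ha]))]

lemma prefTab_getD (w : List Int) (c : Int) (m : Nat) (hm : m < w.length) :
    PySem.List.pyGetD (prefTab w c) ((m:Int)+1) 0 = cnt (w.take (m+1)) c := by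
  rw [prefTab_eq]
  rw [show ((m:Int)+1) = (((m+1 : Nat)):Int) by push_cast; ring]
  rw [PySem.List.pyGetD_natCast]
  rw [PySem.List.getD_map_range _ _ _ _ (by omega)]

lemma B_translate (u v : List Int) (hu : ∀ d ∈ u, 0 ≤ d ∧ d < 10) (hv : ∀ d ∈ v, 0 ≤ d ∧ d < 10) :
    ((List.range 10).all (fun c =>
      (((((List.range 10).map (fun c : Nat => posList u (c:Int))).getD c []).zip
        (((List.range 10).map (fun c : Nat => posList v (c:Int))).getD c [])).all (fun im =>
        (PySem.List.pyRange ((c:Int)+1) 10 1).all (fun j =>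
          PySem.List.pyGetD (((List.range 10).map (fun c : Nat => prefTab v (c:Int))).getD j.toNat []) (im.2+1) 0 ≤
          PySem.List.pyGetD (((List.range 10).map (fun c : Nat => prefTab u (c:Int))).getD j.toNat []) (im.1+1) 0))))
      = restOkB u v []) := by
  unfold restOkB
  apply all_congr_mem
  intro c hc
  have hc10 : c < 10 := by simpa using hc
  rw [PySem.List.getD_map_range _ _ _ _ hc10, PySem.List.getD_map_range _ _ _ _ hc10]
  rw [posList_eq, posList_eq, List.zip_map, List.all_map]
  simp only [List.count_nil, List.drop_zero]
  apply all_congr_mem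
  intro pr hpr
  obtain ⟨hprU, hprV⟩ : pr.1 ∈ occN u (c:Int) ∧ pr.2 ∈ occN v (c:Int) := by
    obtain ⟨a, b⟩ := pr
    exact List.of_mem_zip hpr
  have hiU : pr.1 < u.length := occN_mem_lt _ _ _ hprU
  have hmV : pr.2 < v.length := occN_mem_lt _ _ _ hprV
  apply all_congr_mem
  intro j hj
  obtain ⟨hj1, hj2⟩ := PySem.List.mem_pyRange_one.mp hj
  have hj0 : 0 ≤ j := by omega
  have hjt : j.toNat < 10 := by omega
  rw [PySem.List.getD_map_range _ _ _ _ hjt, PySem.List.getD_map_range _ _ _ _ hjt]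
  rw [show ((j.toNat : Nat) : Int) = j by omega]
  simp only [Function.comp_apply, Prod.map_fst, Prod.map_snd,
    prefTab_getD v j pr.2 hmV, prefTab_getD u j pr.1 hiU]

lemma count_zero_outside (u : List Int) (hu : ∀ d ∈ u, 0 ≤ d ∧ d < 10) (c : Int)
    (hc : ¬ (0 ≤ c ∧ c < 10)) : u.count c = 0 := by
  apply List.count_eq_zero.mpr
  intro hmem
  exact hc (hu c hmem)

theorem isTransformable_spec : Claim_equal_isTransformable := by
  intro s t _ hpre
  unfold Spec_isTransformable isTransformable isTransformable_alt
  by_cases hlen : s.toList.length = t.toList.length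
  case neg =>
    rw [if_pos hlen, if_pos hlen]
  case pos =>
    rw [if_neg (by simp [hlen]), if_neg (by simp [hlen])]
    show (match loop2A s.toList (List.replicate 10 (0:Int)) ((t.toList.foldl stepT (List.replicate 10 (0:Int), PySem.Dict.empty)).2) with | none => false | some count2 => (List.range 10).all (fun i => PySem.List.pyGetD ((t.toList.foldl stepT (List.replicate 10 (0:Int), PySem.Dict.empty)).1) (i:Int) 0 == PySem.List.pyGetD count2 (i:Int) 0))
      = (if ((List.range 10).any (fun c => ((((List.range 10).map (fun c : Nat => posList (mapD s.toList) (c:Int))).getD c []).length ≠ (((List.range 10).map (fun c : Nat => posList (mapD t.toList) (c:Int))).getD c []).length))) then false else ((List.range 10).all (fun c => (((((List.range 10).map (fun c : Nat => posList (mapD s.toList) (c:Int))).getD c []).zip (((List.range 10).map (fun c : Nat => posList (mapD t.toList) (c:Int))).getD c [])).all (fun im => ((PySem.List.pyRange ((c:Int)+1) 10 1).all (fun j => (PySem.List.pyGetD (((List.range 10).map (fun c : Nat => prefTab (mapD t.toList) (c:Int))).getD j.toNat []) (im.2+1) 0 ≤ PySem.List.pyGetD (((List.range 10).map (fun c : Nat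 => prefTab (mapD s.toList) (c:Int))).getD j.toNat []) (im.1+1) 0))))))))
    have hdig : s.toList.all Char.isDigit = true ∧ t.toList.all Char.isDigit = true := by
      cases hpre with
      | inl h => exact absurd hlen h
      | inr h => exact h
    obtain ⟨hds, hdt⟩ := hdig
    have hbs : ∀ ch ∈ s.toList, ch.isDigit = true := List.all_eq_true.mp hds
    have hbt : ∀ ch ∈ t.toList, ch.isDigit = true := List.all_eq_true.mp hdt
    have hub : ∀ d ∈ mapD s.toList, 0 ≤ d ∧ d < 10 := by
      intro d hd
      obtain ⟨ch, hch, rfl⟩ := List.mem_map.mp hd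
      exact pyDigit_bounds ch (hbs ch hch)
    have hvb : ∀ d ∈ mapD t.toList, 0 ≤ d ∧ d < 10 := by
      intro d hd
      obtain ⟨ch, hch, rfl⟩ := List.mem_map.mp hd
      exact pyDigit_bounds ch (hbt ch hch)
    obtain ⟨hT1, hT2⟩ := foldT_spec t.toList hbt
    have hrepl : (List.replicate 10 (0:Int)) = cvec (mapD ([] : List Char)) := by
      rw [show mapD ([] : List Char) = [] from rfl, cvec_nil]
    by_cases hc : ∀ c : Nat, c < 10 →
        (mapD s.toList).count (c:Int) = (mapD t.toList).count (c:Int)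
    · have hcall : ∀ c : Int, (mapD s.toList).count c = (mapD t.toList).count c := by
        intro c
        by_cases h0 : 0 ≤ c ∧ c < 10
        · have := hc c.toNat (by omega)
          rwa [show ((c.toNat : Nat) : Int) = c by omega] at this
        · rw [count_zero_outside _ hub c h0, count_zero_outside _ hvb c h0]
      have hinv := loop2A_inv (mapD t.toList) s.toList [] _
        (by simpa using hbs)
        (by intro c; simpa using hcall c)
        (by intro c; rw [hT2 c]; simp [mapD])
      simp only [List.nil_append] at hinv
      rw [show mapD ([] : List Char) = [] from rfl] at hinv
      have hinv' : loop2A s.toList (List.replicate 10 (0:Int))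
          ((t.toList.foldl stepT (List.replicate 10 (0:Int), PySem.Dict.empty)).2)
          = if restOkB (mapD s.toList) (mapD t.toList) [] = true
            then some (cvec (mapD s.toList)) else none := by
        rw [hrepl, show mapD ([] : List Char) = [] from rfl]
        exact hinv
      rw [hinv']
      have hBany : ((List.range 10).any (fun c => ((((List.range 10).map (fun c : Nat => posList (mapD s.toList) (c:Int))).getD c []).length ≠ (((List.range 10).map (fun c : Nat => posList (mapD t.toList) (c:Int))).getD c []).length))) = false := by
        apply List.any_eq_false.mpr
        intro c hcm
        have hc10 : c < 10 := by simpa using hcm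
        rw [PySem.List.getD_map_range _ _ _ _ hc10, PySem.List.getD_map_range _ _ _ _ hc10]
        rw [posList_eq, posList_eq]
        simp [occN_length, hcall (c:Int)]
      by_cases hrem : restOkB (mapD s.toList) (mapD t.toList) [] = true
      · rw [if_pos hrem]
        show ((List.range 10).all (fun i => PySem.List.pyGetD ((t.toList.foldl stepT (List.replicate 10 (0:Int), PySem.Dict.empty)).1) (i:Int) 0 == PySem.List.pyGetD (cvec (mapD s.toList)) (i:Int) 0)) = (if ((List.range 10).any (fun c => ((((List.range 10).map (fun c : Nat => posList (mapD s.toList) (c:Int))).getD c []).length ≠ (((List.range 10).map (fun c : Nat => posList (mapD t.toList) (c:Int))).getD c []).length))) then false else ((List.range 10).all (fun c => (((((List.range 10).map (fun c : Nat => posList (mapD s.toList) (c:Int))).getD c []).zip (((List.range 10).map (fun c : Nat => posList (mapD t.toList) (c:Int))).getD c [])).all (fun im => ((PySem.List.pyRange ((c:Int)+1) 10 1).all (fun j => (PySem.List.pyGetD (((List.range 10).map (fun c : Nat => prefTab (mapD t.toList) (c:Int))).getD j.toNat []) (im.2+1) 0 ≤ PySem.List.pyGetD (((List.range 10).map (fun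 c : Nat => prefTab (mapD s.toList) (c:Int))).getD j.toNat []) (im.1+1) 0))))))))
        rw [if_neg (by rw [hBany]; simp)]
        rw [B_translate (mapD s.toList) (mapD t.toList) hub hvb, hrem]
        apply List.all_eq_true.mpr
        intro i hi
        have hi10 : i < 10 := by simpa using hi
        rw [hT1]
        rw [cvec_get _ _ (by omega) (by omega), cvec_get _ _ (by omega) (by omega)]
        simp [cnt, hcall (i:Int)]
      · rw [if_neg hrem]
        show false = (if ((List.range 10).any (fun c => ((((List.range 10).map (fun c : Nat => posList (mapD s.toList) (c:Int))).getD c []).length ≠ (((List.range 10).map (fun c : Nat => posList (mapD t.toList) (c:Int))).getD c []).length))) then false else ((List.range 10).all (fun c => (((((List.range 10).map (fun c : Nat => posList (mapD s.toList) (c:Int))).getD c []).zip (((List.range 10).map (fun c : Nat => posList (mapD t.toList) (c:Int))).getD c [])).all (fun im => ((PySem.List.pyRange ((c:Int)+1) 10 1).all (fun j => (PySem.List.pyGetD (((List.range 10).map (fun c : Nat => prefTab (mapD t.toList) (c:Int))).getD j.toNat []) (im.2+1) 0 ≤ PySem.List.pyGetD (((List.range 10).map (fun c : Nat => prefTab (mapD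 s.toList) (c:Int))).getD j.toNat []) (im.1+1) 0))))))))
        rw [if_neg (by rw [hBany]; simp)]
        rw [B_translate (mapD s.toList) (mapD t.toList) hub hvb]
        exact (Bool.eq_false_iff.mpr hrem).symm
    · push_neg at hc
      obtain ⟨c0, hc0, hne⟩ := hc
      have hBany : ((List.range 10).any (fun c => ((((List.range 10).map (fun c : Nat => posList (mapD s.toList) (c:Int))).getD c []).length ≠ (((List.range 10).map (fun c : Nat => posList (mapD t.toList) (c:Int))).getD c []).length))) = true := by
        apply List.any_eq_true.mpr
        refine ⟨c0, by simpa using hc0, ?_⟩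
        rw [PySem.List.getD_map_range _ _ _ _ hc0, PySem.List.getD_map_range _ _ _ _ hc0]
        rw [posList_eq, posList_eq]
        simpa [occN_length] using hne
      cases hloop : loop2A s.toList (List.replicate 10 (0:Int))
          ((t.toList.foldl stepT (List.replicate 10 (0:Int), PySem.Dict.empty)).2) with
      | none =>
          rw [if_pos hBany]
      | some w =>
          have hw : w = cvec (mapD ([] : List Char) ++ mapD s.toList) := by
            apply loop2A_some s.toList [] _ w hbs
            rw [← hrepl]
            exact hloop
          rw [show mapD ([] : List Char) ++ mapD s.toList = mapD s.toList by simp [mapD]] at hw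
          subst hw
          rw [if_pos hBany]
          show ((List.range 10).all (fun i => PySem.List.pyGetD ((t.toList.foldl stepT (List.replicate 10 (0:Int), PySem.Dict.empty)).1) (i:Int) 0 == PySem.List.pyGetD (cvec (mapD s.toList)) (i:Int) 0)) = false
          rw [hT1]
          apply List.all_eq_false.mpr
          refine ⟨c0, by simpa using hc0, ?_⟩
          rw [cvec_get _ _ (by omega) (by omega), cvec_get _ _ (by omega) (by omega)]
          simp only [cnt]
          intro hbad
          apply hne
          have := beq_iff_eq.mp hbad
          exact_mod_cast this.symm
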